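-- pv_equiv track=rewrite | github.com/mykespb/edu | homeinf/count_rects0.py | mysolver
-- ===== SOURCE A (Python) =====
-- def mysolver(a):
--     """solve - finf rects"""
--
--     maxy = len(a)
--     maxx = len(a[0])
--
--     num = 0
--
--     for y in range(maxy):
--         for x in range(maxx):
--
--             if not a[y][x]:
--                 continue
--
--             if y == 0 and x == 0:
--                 num += 1
--
--             elif y == 0 and a[0][x-1] == 0:
--                 num += 1
--
--             elif x == 0 and a[y-1][0] == 0:
--                 num += 1
--
--             elif a[y-1][x] == 0 and a[y][x-1] == 0:
--                 num += 1
--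
--     return num
-- ===== SOURCE B (Python) =====
-- def mysolver(a):
--     """solve - finf rects"""
--     w = len(a[0])
--     h = len(a)
--     cells = [[a[y][x] != 0 for x in range(w)] for y in range(h)]
--     # inclusion-exclusion: corners = cells - horizontal pairs - vertical pairs + L-shaped triples
--     n = sum(cells[y][x] for y in range(h) for x in range(w))
--     hh = sum(cells[y][x - 1] and cells[y][x] for y in range(h) for x in range(1, w))
--     vv = sum(cells[y - 1][x] and cells[y][x] for y in range(1, h) for x in range(w))
--     ll = sum(cells[y][x - 1] and cells[y][x] and cells[y - 1][x] for y in range(1, h) for x in range(1, w))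
--     return n - hh - vv + ll
-- ===== Notes on version B (the rewrite author's own statement) =====
-- stated objective: alternative
-- what changed: Instead of testing the corner predicate per cell in one nested branch chain, B counts global quantities (nonzero cells, horizontal adjacent nonzero pairs, vertical adjacent nonzero pairs, L-shaped nonzero triples) in staged passes and combines them by inclusion-exclusion n-hh-vv+ll.
import Mathlib
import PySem

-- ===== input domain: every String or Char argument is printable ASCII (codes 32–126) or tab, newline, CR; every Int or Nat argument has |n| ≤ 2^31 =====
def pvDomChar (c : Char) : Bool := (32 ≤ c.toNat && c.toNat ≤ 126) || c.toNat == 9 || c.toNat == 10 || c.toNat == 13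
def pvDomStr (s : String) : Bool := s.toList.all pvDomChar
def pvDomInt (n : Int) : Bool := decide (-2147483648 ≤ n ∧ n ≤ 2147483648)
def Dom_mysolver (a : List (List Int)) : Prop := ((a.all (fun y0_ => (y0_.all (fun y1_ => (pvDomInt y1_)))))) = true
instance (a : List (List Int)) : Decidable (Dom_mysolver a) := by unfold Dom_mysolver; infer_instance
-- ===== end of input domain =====

-- B replaces A's per-cell corner test by inclusion-exclusion over globally counted
-- quantities (nonzero cells, horizontal/vertical adjacent pairs, L-triples); same cost.

-- shared indexing helper: a[y][x] (both Pythons index the same way; in-range under Pre_)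
def pvCell (a : List (List Int)) (y x : Int) : Int :=
  PySem.List.pyGetD (PySem.List.pyGetD a y []) x 0

-- ===== PORT A =====
def mysolver (a : List (List Int)) : Int :=
  let maxy : Int := a.length
  let maxx : Int := (PySem.List.pyGetD a 0 []).length
  (PySem.List.pyRange 0 maxy 1).foldl (fun num y =>
    (PySem.List.pyRange 0 maxx 1).foldl (fun num x =>
      if pvCell a y x = 0 then num
      else if y = 0 ∧ x = 0 then num + 1
      else if y = 0 ∧ pvCell a 0 (x - 1) = 0 then num + 1
      else if x = 0 ∧ pvCell a (y - 1) 0 = 0 then num + 1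
      else if pvCell a (y - 1) x = 0 ∧ pvCell a y (x - 1) = 0 then num + 1
      else num) num) 0

-- ===== PORT B =====
def mysolver_alt (a : List (List Int)) : Int :=
  let w : Int := (PySem.List.pyGetD a 0 []).length
  let h : Int := a.length
  let cells : List (List Bool) :=
    (PySem.List.pyRange 0 h 1).map (fun y =>
      (PySem.List.pyRange 0 w 1).map (fun x => pvCell a y x != 0))
  let cb : Int → Int → Bool := fun y x =>
    PySem.List.pyGetD (PySem.List.pyGetD cells y []) x false
  let n : Int := ((PySem.List.pyRange 0 h 1).map (fun y =>
      ((PySem.List.pyRange 0 w 1).map (fun x =>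
        if cb y x then (1 : Int) else 0)).sum)).sum
  let hh : Int := ((PySem.List.pyRange 0 h 1).map (fun y =>
      ((PySem.List.pyRange 1 w 1).map (fun x =>
        if cb y (x - 1) && cb y x then (1 : Int) else 0)).sum)).sum
  let vv : Int := ((PySem.List.pyRange 1 h 1).map (fun y =>
      ((PySem.List.pyRange 0 w 1).map (fun x =>
        if cb (y - 1) x && cb y x then (1 : Int) else 0)).sum)).sum
  let ll : Int := ((PySem.List.pyRange 1 h 1).map (fun y =>
      ((PySem.List.pyRange 1 w 1).map (fun x =>
        if cb y (x - 1) && cb y x && cb (y - 1) x then (1 : Int) else 0)).sum)).sum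
  n - hh - vv + ll

-- ===== PRECONDITION & SPEC =====
-- Pre_ excludes exactly the inputs where A raises IndexError (empty grid, or a row
-- shorter than the first row); B raises there too.
def Pre_mysolver (a : List (List Int)) : Prop :=
  a ≠ [] ∧ ∀ r ∈ a, a.headI.length ≤ r.length
instance (a : List (List Int)) : Decidable (Pre_mysolver a) := by unfold Pre_mysolver; infer_instance

def pvWitness_mysolver : List (List Int) := [[1, 0, 1], [1, 1, 0], [0, 1, 1]]

def Spec_mysolver (a : List (List Int)) (out : Int) : Prop := out = mysolver_alt a
instance (a : List (List Int)) (out : Int) : Decidable (Spec_mysolver a out) := by unfold Spec_mysolver; infer_instance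

-- ===== CLAIM (what is proved, stated in full; the proofs are below) =====
def Claim_equal_mysolver : Prop := ∀ (a : List (List Int)), Dom_mysolver a → Pre_mysolver a → Spec_mysolver a (mysolver a)

-- ===== LEMMAS AND PROOFS =====

-- list-sum helpers
theorem pv_sum_map_congr {a : Type} (l : List a) (f g : a -> Int)
    (h : forall x, x ∈ l -> f x = g x) : (l.map f).sum = (l.map g).sum := by
  rw [List.map_congr_left h]

theorem pv_sum_map_comb {a : Type} (l : List a) (f1 f2 f3 f4 : a -> Int) :
    (l.map f1).sum - (l.map f2).sum - (l.map f3).sum + (l.map f4).sum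
      = (l.map (fun x => f1 x - f2 x - f3 x + f4 x)).sum := by
  induction l with
  | nil => simp
  | cons x xs ih => simp only [List.map_cons, List.sum_cons]; rw [← ih]; ring

-- shift a sum over range(1, n) to a guarded sum over range(0, n)
theorem pv_sum_shift (n : Int) (f : Int -> Int) :
    ((PySem.List.pyRange 1 n 1).map f).sum =
    ((PySem.List.pyRange 0 n 1).map (fun x => if x = 0 then 0 else f x)).sum := by
  by_cases hn : n <= 0
  · rw [PySem.List.pyRange_one_eq_nil (by omega), PySem.List.pyRange_one_eq_nil hn]
    simp
  · rw [PySem.List.pyRange_one_cons (by omega : (0:Int) < n)]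
    rw [List.map_cons, List.sum_cons, if_pos rfl, zero_add]
    apply pv_sum_map_congr
    intro x hx
    rw [PySem.List.mem_pyRange_one] at hx
    rw [if_neg (by omega)]

-- the double sum over the whole grid
def pvS (a : List (List Int)) (g : Int -> Int -> Int) : Int :=
  ((PySem.List.pyRange 0 ((a.length : Int)) 1).map (fun y =>
    ((PySem.List.pyRange 0 (((PySem.List.pyGetD a 0 []).length : Int)) 1).map (fun x =>
      g y x)).sum)).sum

theorem pv_S_comb (a : List (List Int)) (f1 f2 f3 f4 : Int -> Int -> Int) :
    pvS a f1 - pvS a f2 - pvS a f3 + pvS a f4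
      = pvS a (fun y x => f1 y x - f2 y x - f3 y x + f4 y x) := by
  unfold pvS
  rw [pv_sum_map_comb]
  apply pv_sum_map_congr
  intro y _
  rw [pv_sum_map_comb]

theorem pv_S_congr (a : List (List Int)) (f g : Int -> Int -> Int)
    (h : forall y x, f y x = g y x) : pvS a f = pvS a g := by
  unfold pvS
  apply pv_sum_map_congr
  intro y _
  apply pv_sum_map_congr
  intro x _
  exact h y x

-- A's indicator for one cell
def pvIndA (a : List (List Int)) (y x : Int) : Int :=
  if pvCell a y x = 0 then 0
  else if y = 0 ∧ x = 0 then 1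
  else if y = 0 ∧ pvCell a 0 (x - 1) = 0 then 1
  else if x = 0 ∧ pvCell a (y - 1) 0 = 0 then 1
  else if pvCell a (y - 1) x = 0 ∧ pvCell a y (x - 1) = 0 then 1
  else 0

-- A is the double sum of its per-cell indicator
theorem pv_A_eq_sum (a : List (List Int)) : mysolver a = pvS a (pvIndA a) := by
  unfold mysolver pvS
  rw [PySem.List.foldl_congr_mem
    (g := fun num y => num + ((PySem.List.pyRange 0 (((PySem.List.pyGetD a 0 []).length : Int)) 1).map (fun x => pvIndA a y x)).sum)]
  · rw [PySem.List.foldl_add]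
    simp
  · intro num y _
    rw [PySem.List.foldl_congr_mem (g := fun num x => num + pvIndA a y x)]
    · rw [PySem.List.foldl_add]
    · intro num x _
      unfold pvIndA
      split_ifs <;> omega

-- B's cell-matrix lookup, and its value on in-range indices
def pvCB (a : List (List Int)) (y x : Int) : Bool :=
  PySem.List.pyGetD
    (PySem.List.pyGetD
      ((PySem.List.pyRange 0 ((a.length : Int)) 1).map (fun y =>
        (PySem.List.pyRange 0 (((PySem.List.pyGetD a 0 []).length : Int)) 1).map (fun x =>
          pvCell a y x != 0))) y []) x false

theorem pv_cb_eq (a : List (List Int)) (y x : Int)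
    (hy0 : 0 <= y) (hyh : y < (a.length : Int))
    (hx0 : 0 <= x) (hxw : x < ((PySem.List.pyGetD a 0 []).length : Int)) :
    pvCB a y x = (pvCell a y x != 0) := by
  unfold pvCB
  rw [PySem.List.pyGetD_map_pyRange_of_nonneg _ _ _ _ hy0 hyh,
      PySem.List.pyGetD_map_pyRange_of_nonneg _ _ _ _ hx0 hxw]

-- the four staged quantities of B, rewritten as guarded full-grid sums
theorem pv_n_eq (a : List (List Int)) :
    ((PySem.List.pyRange 0 ((a.length : Int)) 1).map (fun y =>
      ((PySem.List.pyRange 0 (((PySem.List.pyGetD a 0 []).length : Int)) 1).map (fun x =>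
        if pvCB a y x then (1 : Int) else 0)).sum)).sum
    = pvS a (fun y x => if pvCell a y x != 0 then (1 : Int) else 0) := by
  unfold pvS
  apply pv_sum_map_congr
  intro y hy
  rw [PySem.List.mem_pyRange_one] at hy
  apply pv_sum_map_congr
  intro x hx
  rw [PySem.List.mem_pyRange_one] at hx
  rw [pv_cb_eq a y x hy.1 hy.2 hx.1 hx.2]

theorem pv_hh_eq (a : List (List Int)) :
    ((PySem.List.pyRange 0 ((a.length : Int)) 1).map (fun y =>
      ((PySem.List.pyRange 1 (((PySem.List.pyGetD a 0 []).length : Int)) 1).map (fun x =>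
        if pvCB a y (x - 1) && pvCB a y x then (1 : Int) else 0)).sum)).sum
    = pvS a (fun y x => if x = 0 then 0 else
        if (pvCell a y (x - 1) != 0) && (pvCell a y x != 0) then (1 : Int) else 0) := by
  unfold pvS
  apply pv_sum_map_congr
  intro y hy
  rw [PySem.List.mem_pyRange_one] at hy
  rw [pv_sum_shift]
  apply pv_sum_map_congr
  intro x hx
  rw [PySem.List.mem_pyRange_one] at hx
  beta_reduce
  by_cases hx0 : x = 0
  · simp [hx0]
  · rw [if_neg hx0, if_neg hx0,
        pv_cb_eq a y (x - 1) hy.1 hy.2 (by omega) (by omega),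
        pv_cb_eq a y x hy.1 hy.2 hx.1 hx.2]

theorem pv_vv_eq (a : List (List Int)) :
    ((PySem.List.pyRange 1 ((a.length : Int)) 1).map (fun y =>
      ((PySem.List.pyRange 0 (((PySem.List.pyGetD a 0 []).length : Int)) 1).map (fun x =>
        if pvCB a (y - 1) x && pvCB a y x then (1 : Int) else 0)).sum)).sum
    = pvS a (fun y x => if y = 0 then 0 else
        if (pvCell a (y - 1) x != 0) && (pvCell a y x != 0) then (1 : Int) else 0) := by
  unfold pvS
  rw [pv_sum_shift]
  apply pv_sum_map_congr
  intro y hy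
  rw [PySem.List.mem_pyRange_one] at hy
  by_cases hy0 : y = 0
  · simp [hy0]
  · rw [if_neg hy0]
    apply pv_sum_map_congr
    intro x hx
    rw [PySem.List.mem_pyRange_one] at hx
    beta_reduce
    rw [if_neg hy0,
        pv_cb_eq a (y - 1) x (by omega) (by omega) hx.1 hx.2,
        pv_cb_eq a y x hy.1 hy.2 hx.1 hx.2]

theorem pv_ll_eq (a : List (List Int)) :
    ((PySem.List.pyRange 1 ((a.length : Int)) 1).map (fun y =>
      ((PySem.List.pyRange 1 (((PySem.List.pyGetD a 0 []).length : Int)) 1).map (fun x =>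
        if pvCB a y (x - 1) && pvCB a y x && pvCB a (y - 1) x then (1 : Int) else 0)).sum)).sum
    = pvS a (fun y x => if y = 0 then 0 else if x = 0 then 0 else
        if (pvCell a y (x - 1) != 0) && (pvCell a y x != 0) && (pvCell a (y - 1) x != 0)
        then (1 : Int) else 0) := by
  unfold pvS
  rw [pv_sum_shift]
  apply pv_sum_map_congr
  intro y hy
  rw [PySem.List.mem_pyRange_one] at hy
  by_cases hy0 : y = 0
  · simp [hy0]
  · rw [if_neg hy0, pv_sum_shift]
    apply pv_sum_map_congr
    intro x hx
    rw [PySem.List.mem_pyRange_one] at hx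
    beta_reduce
    by_cases hx0 : x = 0
    · simp [hx0, hy0]
    · rw [if_neg hx0, if_neg hy0, if_neg hx0,
          pv_cb_eq a y (x - 1) hy.1 hy.2 (by omega) (by omega),
          pv_cb_eq a y x hy.1 hy.2 hx.1 hx.2,
          pv_cb_eq a (y - 1) x (by omega) (by omega) hx.1 hx.2]

-- pointwise inclusion-exclusion identity for one cell
theorem pv_cell_ie (a : List (List Int)) (y x : Int) :
    pvIndA a y x =
      (if pvCell a y x != 0 then (1 : Int) else 0)
      - (if x = 0 then 0 else
          if (pvCell a y (x - 1) != 0) && (pvCell a y x != 0) then (1 : Int) else 0)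
      - (if y = 0 then 0 else
          if (pvCell a (y - 1) x != 0) && (pvCell a y x != 0) then (1 : Int) else 0)
      + (if y = 0 then 0 else if x = 0 then 0 else
          if (pvCell a y (x - 1) != 0) && (pvCell a y x != 0) && (pvCell a (y - 1) x != 0)
          then (1 : Int) else 0) := by
  unfold pvIndA
  by_cases hx : x = 0 <;> by_cases hy : y = 0 <;>
    simp only [hx, hy, bne_iff_ne, ne_eq, ite_not] <;>
    split_ifs <;> simp_all

-- B equals the same double sum, by inclusion-exclusion
theorem pv_B_eq_sum (a : List (List Int)) : mysolver_alt a = pvS a (pvIndA a) := by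
  have hB : mysolver_alt a =
      ((PySem.List.pyRange 0 ((a.length : Int)) 1).map (fun y =>
        ((PySem.List.pyRange 0 (((PySem.List.pyGetD a 0 []).length : Int)) 1).map (fun x =>
          if pvCB a y x then (1 : Int) else 0)).sum)).sum
      - ((PySem.List.pyRange 0 ((a.length : Int)) 1).map (fun y =>
        ((PySem.List.pyRange 1 (((PySem.List.pyGetD a 0 []).length : Int)) 1).map (fun x =>
          if pvCB a y (x - 1) && pvCB a y x then (1 : Int) else 0)).sum)).sum
      - ((PySem.List.pyRange 1 ((a.length : Int)) 1).map (fun y =>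
        ((PySem.List.pyRange 0 (((PySem.List.pyGetD a 0 []).length : Int)) 1).map (fun x =>
          if pvCB a (y - 1) x && pvCB a y x then (1 : Int) else 0)).sum)).sum
      + ((PySem.List.pyRange 1 ((a.length : Int)) 1).map (fun y =>
        ((PySem.List.pyRange 1 (((PySem.List.pyGetD a 0 []).length : Int)) 1).map (fun x =>
          if pvCB a y (x - 1) && pvCB a y x && pvCB a (y - 1) x then (1 : Int) else 0)).sum)).sum := rfl
  rw [hB, pv_n_eq, pv_hh_eq, pv_vv_eq, pv_ll_eq, pv_S_comb]
  apply pv_S_congr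
  intro y x
  exact (pv_cell_ie a y x).symm

-- ===== VERDICT (by name: the statement is the Claim_ definition above) =====
theorem mysolver_spec : Claim_equal_mysolver := by
  intro a _ _
  unfold Spec_mysolver
  rw [pv_A_eq_sum, pv_B_eq_sum]
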